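-- pv_equiv track=rewrite | github.com/ulpi-io/plugin-marketplace | plugins/i18n-expert/skills/i18n-expert/scripts/i18n_audit.py | compute_missing
-- ===== SOURCE A (Python) =====
-- from typing import Dict, Iterable, List, Set
--
-- PLURAL_SUFFIXES = ("_zero", "_one", "_two", "_few", "_many", "_other")
--
-- def has_plural_variant(key: str, key_set: Set[str]) -> bool:
--     return any(f"{key}{suffix}" in key_set for suffix in PLURAL_SUFFIXES)
--
-- def compute_missing(used: Set[str], locale_keys: Set[str]) -> List[str]:
--     missing = []
--     for key in sorted(used):
--         if key in locale_keys:
--             continue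
--         if has_plural_variant(key, locale_keys):
--             continue
--         missing.append(key)
--     return missing
-- ===== SOURCE B (Python) =====
-- PLURAL_SUFFIXES = ("_zero", "_one", "_two", "_few", "_many", "_other")
--
-- def compute_missing(used, locale_keys):
--     plural_covered = set()
--     for lk in locale_keys:
--         for suffix in PLURAL_SUFFIXES:
--             if lk.endswith(suffix):
--                 plural_covered.add(lk[:len(lk) - len(suffix)])
--     return [key for key in sorted(used)
--             if key not in locale_keys and key not in plural_covered]
-- ===== Notes on version B (the rewrite author's own statement) =====
-- stated objective: alternative
-- what changed: Instead of testing each used key against all six suffix-concatenations, B preprocesses locale_keys once into a set of suffix-stripped bases and then filters sorted(used) with two plain membership checks per key.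
import Mathlib
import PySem

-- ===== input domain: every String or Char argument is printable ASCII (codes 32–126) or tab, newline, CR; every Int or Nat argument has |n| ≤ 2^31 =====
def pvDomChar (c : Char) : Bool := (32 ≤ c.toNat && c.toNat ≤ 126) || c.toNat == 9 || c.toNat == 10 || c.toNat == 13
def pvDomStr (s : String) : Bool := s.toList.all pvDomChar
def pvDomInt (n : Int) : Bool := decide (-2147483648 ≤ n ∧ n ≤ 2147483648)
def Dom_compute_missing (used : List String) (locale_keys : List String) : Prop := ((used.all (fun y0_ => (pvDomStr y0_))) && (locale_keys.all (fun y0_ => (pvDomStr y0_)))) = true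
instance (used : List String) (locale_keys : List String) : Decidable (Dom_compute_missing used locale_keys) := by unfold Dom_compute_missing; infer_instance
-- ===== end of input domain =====

-- B replaces A's per-key 6-way suffix-concatenation scan by a one-time pass over locale_keys
-- building the set of suffix-stripped bases, then two membership checks per used key (alternative
-- decomposition; a timing run found no measurable speed difference).

-- ===== PORT A =====
def PLURAL_SUFFIXES : List String := ["_zero", "_one", "_two", "_few", "_many", "_other"]

def has_plural_variant (key : String) (key_set : List String) : Bool :=
  PLURAL_SUFFIXES.any (fun suffix => key_set.contains (key ++ suffix))

def compute_missing (used : List String) (locale_keys : List String) : List String :=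
  (PySem.List.sorted (PySem.Set.ofList used) (fun x => x) false).foldl
    (fun missing key =>
      if locale_keys.contains key then missing
      else if has_plural_variant key locale_keys then missing
      else missing ++ [key]) []

-- ===== PORT B =====
-- lk[:len(lk) - len(suffix)]
def stripSuffix (lk : String) (suffix : String) : String :=
  String.ofList (lk.toList.take (lk.toList.length - suffix.toList.length))

def compute_missing_alt (used : List String) (locale_keys : List String) : List String :=
  let plural_covered : PySem.Set String :=
    locale_keys.foldl (fun acc lk =>
      PLURAL_SUFFIXES.foldl (fun acc suffix =>
        if PySem.Str.endswith lk suffix then PySem.Set.add acc (stripSuffix lk suffix)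
        else acc) acc) PySem.Set.empty
  (PySem.List.sorted (PySem.Set.ofList used) (fun x => x) false).filter
    (fun key => !(locale_keys.contains key) && !(plural_covered.contains key))

-- ===== PRECONDITION & SPEC =====
def Spec_compute_missing (used : List String) (locale_keys : List String) (out : List String) : Prop := out = compute_missing_alt used locale_keys
instance (used : List String) (locale_keys : List String) (out : List String) : Decidable (Spec_compute_missing used locale_keys out) := by unfold Spec_compute_missing; infer_instance

-- ===== CLAIM (what is proved, stated in full; the proofs are below) =====
def Claim_equal_compute_missing : Prop := ∀ (used : List String) (locale_keys : List String), Dom_compute_missing used locale_keys → Spec_compute_missing used locale_keys (compute_missing used locale_keys)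

-- ===== LEMMAS AND PROOFS =====

-- membership in the inner fold over the six suffixes
lemma mem_inner_fold (lk : String) (sufs : List String) (acc : PySem.Set String) (x : String) :
    x ∈ sufs.foldl (fun acc suffix =>
        if PySem.Str.endswith lk suffix then PySem.Set.add acc (stripSuffix lk suffix)
        else acc) acc ↔
      x ∈ acc ∨ ∃ s ∈ sufs, PySem.Str.endswith lk s = true ∧ x = stripSuffix lk s := by
  induction sufs generalizing acc with
  | nil => simp
  | cons s rest ih =>
    simp only [List.foldl_cons]
    by_cases h : PySem.Str.endswith lk s = true
    · rw [if_pos h, ih, PySem.Set.mem_add]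
      simp only [List.mem_cons, exists_eq_or_imp, h, true_and]
      tauto
    · rw [if_neg h, ih]
      simp only [List.mem_cons, exists_eq_or_imp]
      have hne : ¬(PySem.Str.endswith lk s = true ∧ x = stripSuffix lk s) := fun hc => h hc.1
      tauto

-- membership in the covered set built by the outer pass over locale_keys
lemma mem_covered (lks : List String) (acc : PySem.Set String) (x : String) :
    x ∈ lks.foldl (fun acc lk =>
        PLURAL_SUFFIXES.foldl (fun acc suffix =>
          if PySem.Str.endswith lk suffix then PySem.Set.add acc (stripSuffix lk suffix)
          else acc) acc) acc ↔
      x ∈ acc ∨ ∃ lk ∈ lks, ∃ s ∈ PLURAL_SUFFIXES,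
        PySem.Str.endswith lk s = true ∧ x = stripSuffix lk s := by
  induction lks generalizing acc with
  | nil => simp
  | cons lk rest ih =>
    simp only [List.foldl_cons]
    rw [ih, mem_inner_fold]
    simp only [List.mem_cons, exists_eq_or_imp]
    rw [or_assoc]

-- the string fact: "lk ends with s and stripping s from lk gives key" ↔ lk = key ++ s
lemma endswith_strip_iff (lk s key : String) :
    (PySem.Str.endswith lk s = true ∧ key = stripSuffix lk s) ↔ lk = key ++ s := by
  rw [PySem.Str.endswith_eq, PySem.Chars.endswith_iff]
  constructor
  · rintro ⟨⟨t, ht⟩, hstrip⟩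
    -- ht : t ++ s.toList = lk.toList
    have hkey : key.toList = t := by
      rw [hstrip]
      simp only [stripSuffix, String.toList_ofList, ← ht]
      simp
    apply String.toList_inj.mp
    rw [← ht, String.toList_append, hkey]
  · rintro rfl
    refine ⟨⟨key.toList, by simp⟩, ?_⟩
    apply String.toList_inj.mp
    simp only [stripSuffix, String.toList_ofList, String.toList_append]
    simp

-- the covered-set membership test is exactly A's has_plural_variant
lemma covered_iff_has_plural (locale_keys : List String) (key : String) :
    (locale_keys.foldl (fun acc lk =>
        PLURAL_SUFFIXES.foldl (fun acc suffix =>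
          if PySem.Str.endswith lk suffix then PySem.Set.add acc (stripSuffix lk suffix)
          else acc) acc) PySem.Set.empty).contains key = has_plural_variant key locale_keys := by
  rw [Bool.eq_iff_iff, PySem.Set.contains_iff, mem_covered]
  simp only [has_plural_variant, List.any_eq_true, List.contains_eq_mem, decide_eq_true_eq,
    PySem.Set.empty, List.not_mem_nil, false_or]
  constructor
  · rintro ⟨lk, hlk, s, hs, hes⟩
    rw [(endswith_strip_iff lk s key).mp hes] at hlk
    exact ⟨s, hs, hlk⟩
  · rintro ⟨s, hs, hmem⟩
    exact ⟨key ++ s, hmem, s, hs, (endswith_strip_iff (key ++ s) s key).mpr rfl⟩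

-- A's three-way branch is the single guarded append of the library loop shape
lemma stepA_eq (locale_keys : List String) :
    (fun (missing : List String) (key : String) =>
      if locale_keys.contains key then missing
      else if has_plural_variant key locale_keys then missing
      else missing ++ [key]) =
    (fun missing key =>
      if (!(locale_keys.contains key) && !(has_plural_variant key locale_keys)) then
        missing ++ [id key]
      else missing) := by
  funext missing key
  by_cases h1 : key ∈ locale_keys
  · simp [h1]
  · by_cases h2 : has_plural_variant key locale_keys = true <;> simp [h1, h2]

-- ===== VERDICT (by name: the statement is the Claim_ definition above) =====
theorem compute_missing_spec : Claim_equal_compute_missing := by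
  intro used locale_keys _
  unfold Spec_compute_missing compute_missing compute_missing_alt
  rw [stepA_eq, PySem.List.foldl_append_if _ id, List.map_id, List.nil_append]
  refine List.filter_congr ?_
  intro key _
  rw [covered_iff_has_plural]
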